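-- pv_equiv track=rewrite | github.com/chihungtzeng/online_judge | python/p00036.py | valid_zone
-- ===== SOURCE A (Python) =====
-- def valid_zone(zone, board):
--     counter = {}
--     for r, c in zone:
--         v = board[r][c]
--         if v != ".":
--             counter[v] = 1 + counter.get(v, 0)
--     for k in counter:
--         if counter[k] > 1:
--             return False
--     return True
-- ===== SOURCE B (Python) =====
-- def valid_zone(zone, board):
--     seen = set()
--     for r, c in zone:
--         v = board[r][c]
--         if v != ".":
--             if v in seen:
--                 return False
--             seen.add(v)
--     return True
-- ===== Notes on version B (the rewrite author's own statement) =====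
-- stated objective: idiomatic
-- what changed: Replaced the build-a-count-dict-then-scan-it two-phase algorithm with a single pass over the zone keeping a set of seen values and returning False at the first repeated non-dot value.
import Mathlib
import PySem

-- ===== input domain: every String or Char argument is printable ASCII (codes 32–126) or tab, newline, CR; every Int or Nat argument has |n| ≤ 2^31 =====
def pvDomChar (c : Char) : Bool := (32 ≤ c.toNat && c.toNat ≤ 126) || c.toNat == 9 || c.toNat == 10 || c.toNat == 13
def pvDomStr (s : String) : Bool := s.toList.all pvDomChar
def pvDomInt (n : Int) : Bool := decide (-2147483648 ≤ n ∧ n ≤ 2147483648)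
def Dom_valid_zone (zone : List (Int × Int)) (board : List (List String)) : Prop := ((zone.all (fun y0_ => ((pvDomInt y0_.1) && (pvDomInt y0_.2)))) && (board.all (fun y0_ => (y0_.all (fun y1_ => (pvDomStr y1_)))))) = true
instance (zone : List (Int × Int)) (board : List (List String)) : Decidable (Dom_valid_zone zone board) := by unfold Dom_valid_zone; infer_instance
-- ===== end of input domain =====

-- B replaces A's build-a-count-dict-then-scan-it two-phase check by a single pass with a
-- `seen` set and early exit at the first repeated non-dot value (objective: idiomatic).

-- ===== PORT A =====
-- 'for k in counter: if counter[k] > 1: return False' / 'return True'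
def pvScanCounter (d : PySem.Dict String Int) : List String → Bool
  | [] => true
  | k :: ks => if d.getD k 0 > 1 then false else pvScanCounter d ks

def valid_zone (zone : List (Int × Int)) (board : List (List String)) : Bool :=
  let counter := zone.foldl (fun d rc =>
    let v := PySem.List.pyGetD (PySem.List.pyGetD board rc.1 []) rc.2 ""
    if v ≠ "." then d.insert v (1 + d.getD v 0) else d) PySem.Dict.empty
  pvScanCounter counter counter.keys

-- ===== PORT B =====
-- single loop over the zone with early return on a value already in `seen`
def pvScanSeen (board : List (List String)) : List (Int × Int) → PySem.Set String → Bool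
  | [], _ => true
  | rc :: rest, seen =>
    let v := PySem.List.pyGetD (PySem.List.pyGetD board rc.1 []) rc.2 ""
    if v ≠ "." then
      if seen.contains v then false
      else pvScanSeen board rest (seen.add v)
    else pvScanSeen board rest seen

def valid_zone_alt (zone : List (Int × Int)) (board : List (List String)) : Bool :=
  pvScanSeen board zone PySem.Set.empty

-- ===== PRECONDITION & SPEC =====
-- Pre_ excludes exactly the inputs where Python's board[r][c] raises IndexError.
def Pre_valid_zone (zone : List (Int × Int)) (board : List (List String)) : Prop :=
  ∀ rc ∈ zone, PySem.Raise.InRange board.length rc.1 ∧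
    PySem.Raise.InRange (PySem.List.pyGetD board rc.1 []).length rc.2
instance (zone : List (Int × Int)) (board : List (List String)) : Decidable (Pre_valid_zone zone board) := by unfold Pre_valid_zone; infer_instance

def pvWitness_valid_zone : (List (Int × Int)) × List (List String) :=
  ([(0, 0), (0, 1)], [["1", "."]])

def Spec_valid_zone (zone : List (Int × Int)) (board : List (List String)) (out : Bool) : Prop := out = valid_zone_alt zone board
instance (zone : List (Int × Int)) (board : List (List String)) (out : Bool) : Decidable (Spec_valid_zone zone board out) := by unfold Spec_valid_zone; infer_instance

-- ===== CLAIM (what is proved, stated in full; the proofs are below) =====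
def Claim_equal_valid_zone : Prop := ∀ (zone : List (Int × Int)) (board : List (List String)), Dom_valid_zone zone board → Pre_valid_zone zone board → Spec_valid_zone zone board (valid_zone zone board)

-- ===== LEMMAS AND PROOFS =====

-- the non-dot values read from the zone cells
def pvVals (zone : List (Int × Int)) (board : List (List String)) : List String :=
  (zone.map (fun rc => PySem.List.pyGetD (PySem.List.pyGetD board rc.1 []) rc.2 "")).filter
    (fun v => decide (v ≠ "."))

lemma getD_count_fold (l : List String) (d : PySem.Dict String Int) (v : String) :
    (l.foldl (fun d x => d.insert x (1 + d.getD x 0)) d).getD v 0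
      = d.getD v 0 + l.count v := by
  induction l generalizing d with
  | nil => simp
  | cons x xs ih =>
    simp only [List.foldl_cons, ih, PySem.Dict.getD_insert, List.count_cons]
    by_cases h : v = x
    · simp only [h, beq_self_eq_true, if_pos]
      push_cast
      omega
    · simp [h, (Ne.symm h : ¬x = v)]

lemma scanCounter_eq_all (d : PySem.Dict String Int) (ks : List String) :
    pvScanCounter d ks = ks.all (fun k => decide (d.getD k 0 ≤ 1)) := by
  induction ks with
  | nil => rfl
  | cons k ks ih =>
    simp only [pvScanCounter, List.all_cons, ih]
    by_cases h : d.getD k 0 > 1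
    all_goals simp [h]
    all_goals omega

def pvCounterF (zone : List (Int × Int)) (board : List (List String)) :
    PySem.Dict String Int :=
  zone.foldl (fun d rc =>
    let v := PySem.List.pyGetD (PySem.List.pyGetD board rc.1 []) rc.2 ""
    if v ≠ "." then d.insert v (1 + d.getD v 0) else d) PySem.Dict.empty

lemma foldl_counter_eq (board : List (List String)) (zone : List (Int × Int))
    (d : PySem.Dict String Int) :
    zone.foldl (fun d rc =>
      let v := PySem.List.pyGetD (PySem.List.pyGetD board rc.1 []) rc.2 ""
      if v ≠ "." then d.insert v (1 + d.getD v 0) else d) d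
      = (pvVals zone board).foldl (fun d x => d.insert x (1 + d.getD x 0)) d := by
  induction zone generalizing d with
  | nil => rfl
  | cons rc rest ih =>
    simp only [List.foldl_cons, pvVals, List.map_cons, List.filter_cons]
    by_cases hv : (PySem.List.pyGetD (PySem.List.pyGetD board rc.1 []) rc.2 "") = "."
    · simpa [pvVals, hv] using ih _
    · simpa [pvVals, hv] using ih _

lemma counterF_eq (zone : List (Int × Int)) (board : List (List String)) :
    pvCounterF zone board
      = (pvVals zone board).foldl (fun d x => d.insert x (1 + d.getD x 0))
          PySem.Dict.empty := by
  unfold pvCounterF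
  exact foldl_counter_eq board zone PySem.Dict.empty

lemma valid_zone_eq_nodup (zone : List (Int × Int)) (board : List (List String)) :
    valid_zone zone board = decide (pvVals zone board).Nodup := by
  have hshow : valid_zone zone board
      = pvScanCounter (pvCounterF zone board) (pvCounterF zone board).keys := by
    unfold valid_zone pvCounterF
    rfl
  rw [hshow, counterF_eq, scanCounter_eq_all, PySem.Dict.keys_foldl_insert,
    PySem.Dict.keys_empty, Bool.eq_iff_iff]
  have hup : PySem.Set.update ([] : PySem.Set String) (pvVals zone board)
      = PySem.Set.ofList (pvVals zone board) := rfl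
  simp only [hup, List.all_eq_true, PySem.Set.mem_ofList, decide_eq_true_eq,
    getD_count_fold, PySem.Dict.getD_empty, zero_add, List.nodup_iff_count_le_one]
  constructor
  · intro h a
    by_cases ha : a ∈ pvVals zone board
    · have := h a ha; exact_mod_cast this
    · simp [List.count_eq_zero_of_not_mem ha]
  · intro h k _
    exact_mod_cast h k

lemma scanSeen_iff (board : List (List String)) (zone : List (Int × Int))
    (seen : PySem.Set String) :
    pvScanSeen board zone seen = true ↔
      (pvVals zone board).Nodup ∧ ∀ v ∈ pvVals zone board, v ∉ seen := by
  induction zone generalizing seen with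
  | nil => simp [pvScanSeen, pvVals]
  | cons rc rest ih =>
    show (if (PySem.List.pyGetD (PySem.List.pyGetD board rc.1 []) rc.2 "") ≠ "." then
        (if PySem.Set.contains seen (PySem.List.pyGetD (PySem.List.pyGetD board rc.1 []) rc.2 "") then false
         else pvScanSeen board rest (PySem.Set.add seen (PySem.List.pyGetD (PySem.List.pyGetD board rc.1 []) rc.2 "")))
      else pvScanSeen board rest seen) = true ↔ _
    by_cases hv : (PySem.List.pyGetD (PySem.List.pyGetD board rc.1 []) rc.2 "") = "."
    · rw [if_neg (not_not_intro hv)]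
      have hfil : pvVals (rc :: rest) board = pvVals rest board := by
        simp [pvVals, hv]
      rw [hfil, ih]
    · rw [if_pos hv]
      have hfil : pvVals (rc :: rest) board
          = (PySem.List.pyGetD (PySem.List.pyGetD board rc.1 []) rc.2 "") :: pvVals rest board := by
        simp [pvVals, hv]
      rw [hfil]
      by_cases hc : (PySem.List.pyGetD (PySem.List.pyGetD board rc.1 []) rc.2 "") ∈ seen
      · rw [if_pos ((PySem.Set.contains_iff _ _).mpr hc)]
        simp only [Bool.false_eq_true, false_iff, not_and]
        intro _ hall
        exact absurd hc (hall _ (List.mem_cons_self))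
      · rw [if_neg (fun h => hc ((PySem.Set.contains_iff _ _).mp h))]
        rw [ih]
        simp only [List.nodup_cons, List.mem_cons, PySem.Set.mem_add]
        constructor
        · rintro ⟨hnd, hall⟩
          refine ⟨⟨fun hmem => hall _ hmem (Or.inr rfl), hnd⟩, fun w hw => ?_⟩
          rcases hw with rfl | hw
          · exact hc
          · exact fun hws => hall w hw (Or.inl hws)
        · rintro ⟨⟨hnmem, hnd⟩, hall⟩
          refine ⟨hnd, fun w hw hor => ?_⟩
          rcases hor with hws | rfl
          · exact hall w (Or.inr hw) hws
          · exact hnmem hw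

-- ===== VERDICT (by name: the statement is the Claim_ definition above) =====
theorem valid_zone_spec : Claim_equal_valid_zone := by
  intro zone board _ _
  unfold Spec_valid_zone valid_zone_alt
  rw [valid_zone_eq_nodup, Bool.eq_iff_iff, decide_eq_true_eq, scanSeen_iff]
  simp [PySem.Set.empty]
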